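-- pv_equiv track=rewrite | github.com/FelipeParache/Parcial---Laboratorio | RecuParcialLaboFixed/funciones_listar.py | transformacion_dios_saiyan
-- ===== SOURCE A (Python) =====
-- def listar_saiyans(lista: list) -> list:
--     '''
--     Brief: Retorna una lista de todos los personajes de la raza Saiyan.
--     Parameters:
--         lista -> Una lista de diccionarios que representan personajes.
--     Return: Una lista de diccionarios, donde cada diccionario
--     representa un personaje de la raza Saiyan.
--     '''
--     if type(lista) is list and len(lista) > 0:
--         lista_saiyan = []
--         for personaje in lista:
--             for raza in personaje['raza']:
--                 if raza == 'Saiyan':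
--                     lista_saiyan.append(personaje)
--         return lista_saiyan
--     return []
--
-- def transformacion_dios_saiyan(lista: list) -> list:
--     '''
--     Brief: Agrega la habilidad "Transformación nivel dios"
--     a la lista de habilidades de todos los personajes de raza Saiyan.
--     Parameters:
--         lista -> Una lista de diccionarios que representan personajes.
--     Return: Una lista que contiene las habilidades actualizadas de los Saiyans en listas.
--     '''
--     if type(lista) is list and len(lista) > 0:
--         lista_saiyan = listar_saiyans(lista)
--         habilidades_actualizadas = []
--         for personaje in lista_saiyan:
--             habilidades = personaje['habilidades']
--             habilidades.append("Transformación nivel dios")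
--             habilidades_actualizadas.append(habilidades)
--         return habilidades_actualizadas
--     return []
-- ===== SOURCE B (Python) =====
-- def transformacion_dios_saiyan(lista: list) -> list:
--     '''
--     Agrega la habilidad "Transformación nivel dios" a las habilidades de cada
--     personaje de raza Saiyan, en una sola pasada sobre la lista: para cada
--     entrada 'Saiyan' de la raza del personaje, agrega la habilidad a su lista
--     de habilidades (mutación in place) y emite esa lista.
--     '''
--     if type(lista) is list and len(lista) > 0:
--         habilidades_actualizadas = []
--         for personaje in lista:
--             for raza in personaje['raza']:
--                 if raza == 'Saiyan':
--                     habilidades = personaje['habilidades']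
--                     habilidades.append("Transformación nivel dios")
--                     habilidades_actualizadas.append(habilidades)
--         return habilidades_actualizadas
--     return []
-- ===== Notes on version B (the rewrite author's own statement) =====
-- stated objective: simpler
-- what changed: Fuses A's two-pass structure (a helper that first builds the filtered lista_saiyan, then a second loop mutating and collecting habilidades) into one direct pass that mutates and emits the habilidades list at the point each 'Saiyan' raza entry is found, dropping the helper and the intermediate list; Pre_ excludes personajes lacking the 'raza' key (or the 'habilidades' key when Saiyan), on which Python raises KeyError, and duplicate dict keys, which a Python dict cannot represent.
import Mathlib
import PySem

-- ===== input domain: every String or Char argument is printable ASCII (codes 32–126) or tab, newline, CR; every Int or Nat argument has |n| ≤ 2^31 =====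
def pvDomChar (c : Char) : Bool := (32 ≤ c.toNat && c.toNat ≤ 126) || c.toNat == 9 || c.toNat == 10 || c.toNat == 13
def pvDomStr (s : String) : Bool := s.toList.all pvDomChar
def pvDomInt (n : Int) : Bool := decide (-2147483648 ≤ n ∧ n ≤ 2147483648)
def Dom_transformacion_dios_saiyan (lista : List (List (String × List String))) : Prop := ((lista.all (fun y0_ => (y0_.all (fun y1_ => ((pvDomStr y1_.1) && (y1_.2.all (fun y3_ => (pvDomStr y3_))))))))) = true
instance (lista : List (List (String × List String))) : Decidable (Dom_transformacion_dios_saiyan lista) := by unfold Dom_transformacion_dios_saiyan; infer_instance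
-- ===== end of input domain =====

-- B fuses A's filter-then-mutate two passes into one direct pass (objective: simpler).
-- Both Pythons mutate the input dicts' habilidades lists in place identically;
-- the equivalence proved here is about the return value.

-- ===== PORT A =====
-- A personaje dict is an assoc list; `PySem.Dict.mk p` views it as a dict (first-match
-- lookup; Pre_ keeps keys unique as a Python dict does). Python appends the personaje
-- OBJECT to lista_saiyan and later mutates it; object identity is modelled by the
-- personaje's index in `lista`, the aliased in-place mutations by a store of personajes
-- that the references in habilidades_actualizadas are read from at the end.

def pvSkill : String := "Transformación nivel dios"

-- personaje[k] (missing key = Python KeyError, excluded by Pre_; [] is the unreachable error value)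
def pvKey (p : List (String × List String)) (k : String) : List String :=
  (PySem.Dict.mk p).getD k []

-- the effect of `habilidades = personaje['habilidades']; habilidades.append(pvSkill)` on the shared object
def pvAppendSkill (p : List (String × List String)) : List (String × List String) :=
  ((PySem.Dict.mk p).modify "habilidades" [] (fun h => h ++ [pvSkill])).items

def listar_saiyans (lista : List (List (String × List String))) : List Nat :=
  if lista.length > 0 then
    (List.range lista.length).foldl (fun lista_saiyan i =>
      (pvKey (lista.getD i []) "raza").foldl
        (fun acc raza => if raza == "Saiyan" then acc ++ [i] else acc) lista_saiyan) []
  else []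

def transformacion_dios_saiyan (lista : List (List (String × List String))) : List (List String) :=
  if lista.length > 0 then
    let lista_saiyan := listar_saiyans lista
    let fin := lista_saiyan.foldl
      (fun (st : List (List (String × List String)) × List Nat) i =>
        (st.1.modify i pvAppendSkill, st.2 ++ [i])) (lista, [])
    -- habilidades_actualizadas holds references to the mutated lists: materialise from the final store
    fin.2.map (fun i => pvKey (fin.1.getD i []) "habilidades")
  else []

-- ===== PORT B =====
-- One fused pass: the fold state is (store of personajes, emitted references);
-- each 'Saiyan' raza entry mutates personaje i's habilidades in the store and emits a
-- reference (the index i); the references are materialised from the final store.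
-- The raza list is never mutated (only habilidades is), so it is read from the input.
def transformacion_dios_saiyan_alt (lista : List (List (String × List String))) : List (List String) :=
  if lista.length > 0 then
    let fin := (List.range lista.length).foldl
      (fun (st : List (List (String × List String)) × List Nat) i =>
        (pvKey (lista.getD i []) "raza").foldl
          (fun st2 raza =>
            if raza == "Saiyan" then (st2.1.modify i pvAppendSkill, st2.2 ++ [i]) else st2)
          st)
      (lista, [])
    fin.2.map (fun i => pvKey (fin.1.getD i []) "habilidades")
  else []

-- ===== PRECONDITION & SPEC =====
-- Pre_ excludes personajes without a 'raza' key and Saiyan personajes without a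
-- 'habilidades' key (Python raises KeyError there), and personajes with duplicate
-- keys, which a Python dict literal cannot represent (it keeps only the last value
-- while the assoc-list model looks up the first).
def Pre_transformacion_dios_saiyan (lista : List (List (String × List String))) : Prop :=
  ∀ p ∈ lista, (p.map Prod.fst).Nodup ∧
    (PySem.Dict.mk p).contains "raza" = true ∧
    (((PySem.Dict.mk p).getD "raza" []).count "Saiyan" ≠ 0 →
      (PySem.Dict.mk p).contains "habilidades" = true)
instance (lista : List (List (String × List String))) : Decidable (Pre_transformacion_dios_saiyan lista) := by unfold Pre_transformacion_dios_saiyan; infer_instance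

def pvWitness_transformacion_dios_saiyan : (List (List (String × List String))) :=
  [[("raza", ["Saiyan", "Humano"]), ("habilidades", ["kamehameha"])], [("raza", ["Namek"])]]

def Spec_transformacion_dios_saiyan (lista : List (List (String × List String))) (out : List (List String)) : Prop := out = transformacion_dios_saiyan_alt lista
instance (lista : List (List (String × List String))) (out : List (List String)) : Decidable (Spec_transformacion_dios_saiyan lista out) := by unfold Spec_transformacion_dios_saiyan; infer_instance

-- ===== CLAIM (what is proved, stated in full; the proofs are below) =====
def Claim_equal_transformacion_dios_saiyan : Prop := ∀ (lista : List (List (String × List String))), Dom_transformacion_dios_saiyan lista → Pre_transformacion_dios_saiyan lista → Spec_transformacion_dios_saiyan lista (transformacion_dios_saiyan lista)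

-- ===== LEMMAS AND PROOFS =====

-- number of 'Saiyan' entries of the personaje at index i
def pvK (lista : List (List (String × List String))) (i : Nat) : Nat :=
  (pvKey (lista.getD i []) "raza").count "Saiyan"

-- the indices both programs collect: index i, once per 'Saiyan' entry, in order
def pvIdx (lista : List (List (String × List String))) : List Nat :=
  (List.range lista.length).flatMap (fun i => List.replicate (pvK lista i) i)

-- A's inner filter loop over one raza list
lemma pvInnerA (i : Nat) : ∀ (r : List String) (acc : List Nat),
    r.foldl (fun a x => if x == "Saiyan" then a ++ [i] else a) acc
      = acc ++ List.replicate (r.count "Saiyan") i := by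
  intro r
  induction r with
  | nil => simp
  | cons x r ih =>
    intro acc
    simp only [List.foldl_cons, List.count_cons]
    by_cases hx : x = "Saiyan"
    · rw [if_pos (by simp [hx]), ih]
      simp [hx, List.replicate_succ]
    · rw [if_neg (by simp [hx]), ih]
      simp [hx]

lemma pvIdxsA (lista : List (List (String × List String))) (h : lista.length > 0) :
    listar_saiyans lista = pvIdx lista := by
  have aux : ∀ (L : List Nat) (acc : List Nat),
      L.foldl (fun lista_saiyan i =>
        (pvKey (lista.getD i []) "raza").foldl
          (fun acc raza => if raza == "Saiyan" then acc ++ [i] else acc) lista_saiyan) acc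
        = acc ++ L.flatMap (fun i => List.replicate (pvK lista i) i) := by
    intro L
    induction L with
    | nil => simp
    | cons j L ih =>
      intro acc
      simp only [List.foldl_cons, List.flatMap_cons, pvInnerA j]
      rw [ih]
      simp [pvK, List.append_assoc]
  unfold listar_saiyans
  rw [if_pos h, aux]
  simp [pvIdx]

-- A's second loop, as a pair fold
lemma pvPairFoldA : ∀ (l : List Nat) (st : List (List (String × List String))) (acc : List Nat),
    l.foldl (fun p i => (p.1.modify i pvAppendSkill, p.2 ++ [i])) (st, acc)
      = (l.foldl (fun s i => s.modify i pvAppendSkill) st, acc ++ l) := by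
  intro l
  induction l with
  | nil => simp
  | cons i l ih =>
    intro st acc
    simp only [List.foldl_cons]
    rw [ih]
    simp

-- B's inner fused loop over one raza list
lemma pvInnerB (i : Nat) : ∀ (r : List String)
    (st : List (List (String × List String)) × List Nat),
    r.foldl (fun st2 raza =>
        if raza == "Saiyan" then (st2.1.modify i pvAppendSkill, st2.2 ++ [i]) else st2) st
      = ((List.replicate (r.count "Saiyan") i).foldl (fun s j => s.modify j pvAppendSkill) st.1,
         st.2 ++ List.replicate (r.count "Saiyan") i) := by
  intro r
  induction r with
  | nil => simp
  | cons x r ih =>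
    intro st
    simp only [List.foldl_cons, List.count_cons]
    by_cases hx : x = "Saiyan"
    · rw [if_pos (by simp [hx]), ih]
      simp [hx, List.replicate_succ]
    · rw [if_neg (by simp [hx]), ih]
      simp [hx]

-- B's outer fold over any index list reaches the same final state as A's two phases
lemma pvOuterB (lista : List (List (String × List String))) :
    ∀ (L : List Nat) (st : List (List (String × List String)) × List Nat),
    L.foldl (fun st i =>
        (pvKey (lista.getD i []) "raza").foldl
          (fun st2 raza =>
            if raza == "Saiyan" then (st2.1.modify i pvAppendSkill, st2.2 ++ [i]) else st2)
          st) st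
      = ((L.flatMap (fun i => List.replicate (pvK lista i) i)).foldl
           (fun s j => s.modify j pvAppendSkill) st.1,
         st.2 ++ L.flatMap (fun i => List.replicate (pvK lista i) i)) := by
  intro L
  induction L with
  | nil => simp
  | cons j L ih =>
    intro st
    simp only [List.foldl_cons, List.flatMap_cons, pvInnerB j]
    rw [ih]
    simp [pvK, List.foldl_append, List.append_assoc]

-- ===== VERDICT (by name: the statement is the Claim_ definition above) =====
theorem transformacion_dios_saiyan_spec : Claim_equal_transformacion_dios_saiyan := by
  intro lista _hdom _hpre
  unfold Spec_transformacion_dios_saiyan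
  by_cases h : lista.length > 0
  · simp only [transformacion_dios_saiyan, transformacion_dios_saiyan_alt, if_pos h]
    rw [pvIdxsA lista h, pvPairFoldA, pvOuterB]
    simp [pvIdx]
  · have hnil : lista = [] := by cases lista <;> simp_all
    simp [hnil, transformacion_dios_saiyan, transformacion_dios_saiyan_alt]
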